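-- pv_equiv track=rewrite | github.com/kazuya0208442/Algorithm | AtCoder_Beginner_Contest/ABC_238/C.py | lower_count
-- ===== SOURCE A (Python) =====
-- mod = 998244353
--
-- def lower_count(x: int) -> int:
--     x = str(x)
--     digit_count = len(x)
--     x = int(x)
--     ans = 0
--
--     for i in range(10**(digit_count-1), x+1):
--         ans += ((i - 10 ** (digit_count-1)) + 1)
--         ans %= mod
--
--     return ans
-- ===== SOURCE B (Python) =====
-- mod = 998244353
--
-- def lower_count(x: int) -> int:
--     # Closed form: sum_{i=base}^{x} (i-base+1) is the k-th triangular number, k = x-base+1.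
--     base = 10 ** (len(str(x)) - 1)
--     k = x - base + 1
--     if k <= 0:
--         return 0
--     return (k * (k + 1) // 2) % mod
-- ===== Notes on version B (the rewrite author's own statement) =====
-- stated objective: faster
-- what changed: Replaces the O(x) accumulation loop over range(base, x+1) with the closed-form triangular number k*(k+1)//2 mod p, k = x-base+1.
import Mathlib
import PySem

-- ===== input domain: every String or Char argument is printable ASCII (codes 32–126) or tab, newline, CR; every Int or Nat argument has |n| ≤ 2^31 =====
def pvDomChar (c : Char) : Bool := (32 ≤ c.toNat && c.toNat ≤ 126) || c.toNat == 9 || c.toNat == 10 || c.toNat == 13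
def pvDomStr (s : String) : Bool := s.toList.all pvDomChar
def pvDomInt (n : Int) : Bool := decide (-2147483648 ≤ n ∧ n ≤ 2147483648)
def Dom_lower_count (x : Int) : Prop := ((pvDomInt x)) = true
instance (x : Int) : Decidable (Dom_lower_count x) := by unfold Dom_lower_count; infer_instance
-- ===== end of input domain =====

-- B replaces A's O(x) mod-accumulating loop by the closed-form triangular number k*(k+1)//2 mod p (faster, asymptotic).

-- ===== PORT A =====
def lower_count (x : Int) : Int :=
  let s := PySem.Int.toStr x                       -- x = str(x)
  let digit_count : Int := PySem.Str.len s         -- digit_count = len(x)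
  -- x = int(x): the str→int round trip returns the original integer, so the loop bound below is x itself
  let base : Int := (10 : Int) ^ (digit_count - 1).toNat   -- 10**(digit_count-1); digit_count ≥ 1 so the exponent is exact
  (PySem.List.pyRange base (x + 1) 1).foldl
    (fun ans i => PySem.Int.mod (ans + ((i - base) + 1)) 998244353) 0

-- ===== PORT B =====
def lower_count_alt (x : Int) : Int :=
  let base : Int := (10 : Int) ^ ((PySem.Str.len (PySem.Int.toStr x)) - 1).toNat
  let k : Int := x - base + 1
  if k ≤ 0 then 0
  else PySem.Int.mod (PySem.Int.floordiv (k * (k + 1)) 2) 998244353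

-- ===== PRECONDITION & SPEC =====
def Spec_lower_count (x : Int) (out : Int) : Prop := out = lower_count_alt x
instance (x : Int) (out : Int) : Decidable (Spec_lower_count x out) := by unfold Spec_lower_count; infer_instance

-- ===== CLAIM (what is proved, stated in full; the proofs are below) =====
def Claim_equal_lower_count : Prop := ∀ (x : Int), Dom_lower_count x → Spec_lower_count x (lower_count x)

-- ===== LEMMAS AND PROOFS =====

-- A mod-accumulating fold is the mod of the plain sum.
theorem pv_foldl_mod_add (f : Int → Int) (m : Int) (l : List Int) (s : Int) :
    l.foldl (fun a i => PySem.Int.mod (a + f i) m) (PySem.Int.mod s m)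
      = PySem.Int.mod (s + (l.map f).sum) m := by
  induction l generalizing s with
  | nil => simp
  | cons i t ih =>
    simp only [List.foldl_cons, List.map_cons, List.sum_cons]
    have h1 : PySem.Int.mod (PySem.Int.mod s m + f i) m = PySem.Int.mod (s + f i) m := by
      by_cases hm : m = 0
      · simp [PySem.Int.mod, hm]
      · simp [PySem.Int.mod, hm, Int.emod_add_emod]
    rw [h1, show s + (f i + (List.map f t).sum) = (s + f i) + (List.map f t).sum by ring]
    exact ih (s + f i)

-- Gauss: sum of 1..n over List.range.
theorem pv_range_tri (n : Nat) :
    2 * ((List.range n).map (fun j : Nat => (j : Int) + 1)).sum = (n : Int) * ((n : Int) + 1) := by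
  induction n with
  | zero => simp
  | succ n ih =>
    rw [List.range_succ]
    simp only [List.map_append, List.sum_append, List.map_cons, List.map_nil,
      List.sum_cons, List.sum_nil]
    push_cast
    push_cast at ih
    linarith

-- ===== VERDICT (by name: the statement is the Claim_ definition above) =====
theorem lower_count_spec : Claim_equal_lower_count := by
  intro x _
  unfold Spec_lower_count lower_count lower_count_alt
  dsimp only
  set base : Int := (10 : Int) ^ ((PySem.Str.len (PySem.Int.toStr x)) - 1).toNat with hbase
  set k : Int := x - base + 1 with hk
  by_cases hke : k ≤ 0
  · -- empty range: base ≥ x+1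
    rw [PySem.List.pyRange_one_eq_nil (by omega)]
    simp [hke]
  · push_neg at hke
    rw [if_neg (by omega)]
    have hm0 : PySem.Int.mod (0 : Int) 998244353 = 0 := by decide
    rw [show (0 : Int) = PySem.Int.mod 0 998244353 from hm0.symm,
      pv_foldl_mod_add (fun i => (i - base) + 1) 998244353 _ 0, zero_add]
    rw [PySem.List.pyRange_one base (x + 1), List.map_map]
    have hmapeq : ((List.range (x + 1 - base).toNat).map
        ((fun i => (i - base) + 1) ∘ (fun j : Nat => base + (j : Int))))
        = (List.range (x + 1 - base).toNat).map (fun j : Nat => (j : Int) + 1) := by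
      apply List.map_congr_left
      intro j _
      simp
    rw [hmapeq]
    have htri := pv_range_tri (x + 1 - base).toNat
    have hn : ((x + 1 - base).toNat : Int) = k := by omega
    rw [hn] at htri
    have hdiv : PySem.Int.floordiv (k * (k + 1)) 2
        = ((List.range (x + 1 - base).toNat).map (fun j : Nat => (j : Int) + 1)).sum := by
      rw [PySem.Int.floordiv_eq_ediv_of_pos (by omega)]
      omega
    rw [hdiv]
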